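-- pv_equiv track=rewrite | github.com/LIAAD/Text2StoryPackage | text2story/core/utils.py | chunknize_actors
-- ===== SOURCE A (Python) =====
-- def chunknize_actors(annotations):
--     """
--     Parameters
--     ----------
--     annotations : list[tuple[tuple[int, int], str, str]]
--         list of annotations made by some tool for each token
--
--     Returns
--     -------
--     list[tuple[tuple[int, int], str, str]]
--         the list of actors identified where each actor is represented by a tuple
--     """
--
--     actors = []
--
--     ready_to_add = False
--
--     prev_ne_tag = ''
--
--     for ann in annotations:
--         token_character_span, token_pos_tag, token_ne_iob_tag = ann
--
--         # token_ne_iob_tag = 'I-PER', then token_ne_iob_tag[2:] == 'PER'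
--         if token_ne_iob_tag.startswith("B") or (
--                 token_ne_iob_tag.startswith("I") and token_ne_iob_tag[2:] != prev_ne_tag):
--             # Case we start a new chunk, after finishing another, for instance: Case B-Per, I-Per, B(or I)-Org, then we add the finished actor
--             if ready_to_add:
--                 actor = ((actor_start_offset, actor_end_offset), actor_lexical_head, actor_actor_type)
--                 actors.append(actor)
--
--             ready_to_add = True
--             actor_start_offset = token_character_span[0]
--             actor_end_offset = token_character_span[1]
--             actor_lexical_head = token_pos_tag if token_pos_tag in ['Noun', 'Pronoun'] else 'UNDEF'
--             actor_actor_type = token_ne_iob_tag[2:]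
--
--         elif token_ne_iob_tag.startswith("I"):
--             # actor_start_offset it's always the same, since it's defined by the first token of the actor
--             actor_end_offset = token_character_span[1]
--             actor_lexical_head = actor_lexical_head if actor_lexical_head != 'UNDEF' else token_pos_tag if token_pos_tag in [
--                 'Noun', 'Pronoun'] else 'UNDEF'
--             # actor_actor_type it's the same for all tokens that constitute the actor and it's already defined by the first token of the actor
--
--         elif token_ne_iob_tag.startswith("O") and ready_to_add:
--             actor = ((actor_start_offset, actor_end_offset), actor_lexical_head, actor_actor_type)
--             actors.append(actor)
--             ready_to_add = False
--             # No need to reset the variables, since the first update writes over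
--
--         prev_ne_tag = token_ne_iob_tag[2:]
--
--     if ready_to_add:  # If the last token still makes part of the actor
--         actor = ((actor_start_offset, actor_end_offset), actor_lexical_head, actor_actor_type)
--         actors.append(actor)
--
--     return actors
-- ===== SOURCE B (Python) =====
-- def _reduce_group(group):
--     head = next((pos for _, pos, _ in group if pos in ('Noun', 'Pronoun')), 'UNDEF')
--     return ((group[0][0][0], group[-1][0][1]), head, group[0][2][2:])
--
--
-- def chunknize_actors(annotations):
--     # Pass 1: partition the tokens into chunk groups; pass 2: reduce each group to an actor tuple.
--     groups = []
--     current = []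
--     prev_type = ''
--     for ann in annotations:
--         tag = ann[2]
--         tag_type = tag[2:]
--         if tag.startswith('B') or (tag.startswith('I') and tag_type != prev_type):
--             if current:
--                 groups.append(current)
--             current = [ann]
--         elif tag.startswith('I'):
--             if current:
--                 current = current + [ann]
--         elif tag.startswith('O'):
--             if current:
--                 groups.append(current)
--             current = []
--         prev_type = tag_type
--     if current:
--         groups.append(current)
--     return [_reduce_group(g) for g in groups]
-- ===== Notes on version B (the rewrite author's own statement) =====
-- stated objective: alternative
-- what changed: B replaces A's single pass with mutable scalar actor state (running offsets, lexical head, ready/flush flags) by a two-phase decomposition: first partition the tokens into chunk groups, then map each group to its actor tuple (first span start, last span end, first Noun/Pronoun pos else UNDEF, first token's type).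
import Mathlib
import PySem

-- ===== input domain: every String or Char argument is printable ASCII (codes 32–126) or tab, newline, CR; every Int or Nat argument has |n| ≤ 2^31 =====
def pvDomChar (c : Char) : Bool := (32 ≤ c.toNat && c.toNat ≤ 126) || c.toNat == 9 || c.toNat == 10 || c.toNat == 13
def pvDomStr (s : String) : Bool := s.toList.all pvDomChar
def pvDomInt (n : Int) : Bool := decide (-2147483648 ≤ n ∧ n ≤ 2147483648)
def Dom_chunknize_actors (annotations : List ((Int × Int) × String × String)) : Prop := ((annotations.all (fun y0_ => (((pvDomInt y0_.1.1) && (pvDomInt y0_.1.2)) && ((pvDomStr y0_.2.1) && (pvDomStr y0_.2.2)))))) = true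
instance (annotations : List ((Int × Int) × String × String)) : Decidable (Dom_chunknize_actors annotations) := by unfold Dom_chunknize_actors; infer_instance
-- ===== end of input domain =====

-- B rebuilds the chunking as two passes (collect raw token groups, then reduce each group);
-- same return value as A wherever A returns (A raises NameError on inputs excluded by Pre_).

-- ===== PORT A =====
-- A's four actor_* locals are carried as one Option quadruple (start, end, head, type);
-- none = not yet assigned (where Python would raise NameError; excluded by Pre_ below).
def pvFlushA (actors : List ((Int × Int) × String × String))
    (vars : Option (Int × Int × String × String)) : List ((Int × Int) × String × String) :=
  match vars with
  | some v => actors ++ [((v.1, v.2.1), v.2.2.1, v.2.2.2)]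
  | none => actors

def pvStepA
    (st : List ((Int × Int) × String × String) × Bool × String × Option (Int × Int × String × String))
    (ann : (Int × Int) × String × String) :
    List ((Int × Int) × String × String) × Bool × String × Option (Int × Int × String × String) :=
  match st with
  | (actors, ready, prev, vars) =>
    let tag := ann.2.2
    let t := PySem.Str.slice tag (some 2) none
    if PySem.Str.startswith tag "B" || (PySem.Str.startswith tag "I" && (t != prev)) then
      ((if ready then pvFlushA actors vars else actors), true, t,
        some (ann.1.1, ann.1.2,
          (if ann.2.1 == "Noun" || ann.2.1 == "Pronoun" then ann.2.1 else "UNDEF"), t))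
    else if PySem.Str.startswith tag "I" then
      (actors, ready, t, vars.map (fun v =>
        (v.1, ann.1.2,
          (if v.2.2.1 != "UNDEF" then v.2.2.1
           else if ann.2.1 == "Noun" || ann.2.1 == "Pronoun" then ann.2.1 else "UNDEF"),
          v.2.2.2)))
    else if PySem.Str.startswith tag "O" && ready then
      (pvFlushA actors vars, false, t, vars)
    else
      (actors, ready, t, vars)

def chunknize_actors (annotations : List ((Int × Int) × String × String)) :
    List ((Int × Int) × String × String) :=
  match annotations.foldl pvStepA ([], false, "", none) with
  | (actors, ready, _, vars) => if ready then pvFlushA actors vars else actors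

-- ===== PORT B =====
def pvHeadOf : List ((Int × Int) × String × String) → String
  | [] => "UNDEF"
  | a :: r => if a.2.1 == "Noun" || a.2.1 == "Pronoun" then a.2.1 else pvHeadOf r

-- groups are never empty, so the [] case is unreachable (Python indexes group[0]/group[-1])
def pvReduce (g : List ((Int × Int) × String × String)) : (Int × Int) × String × String :=
  match g with
  | [] => ((0, 0), "", "")
  | a :: r => ((a.1.1, ((a :: r).getLastD a).1.2), pvHeadOf (a :: r),
      PySem.Str.slice a.2.2 (some 2) none)

def pvStepB
    (st : List (List ((Int × Int) × String × String)) × List ((Int × Int) × String × String) × String)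
    (ann : (Int × Int) × String × String) :
    List (List ((Int × Int) × String × String)) × List ((Int × Int) × String × String) × String :=
  match st with
  | (groups, current, prev) =>
    let tag := ann.2.2
    let t := PySem.Str.slice tag (some 2) none
    if PySem.Str.startswith tag "B" || (PySem.Str.startswith tag "I" && (t != prev)) then
      ((if current.isEmpty then groups else groups ++ [current]), [ann], t)
    else if PySem.Str.startswith tag "I" then
      (groups, (if current.isEmpty then current else current ++ [ann]), t)
    else if PySem.Str.startswith tag "O" then
      ((if current.isEmpty then groups else groups ++ [current]), [], t)
    else (groups, current, t)

def chunknize_actors_alt (annotations : List ((Int × Int) × String × String)) :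
    List ((Int × Int) × String × String) :=
  match annotations.foldl pvStepB ([], [], "") with
  | (groups, current, _) =>
    (if current.isEmpty then groups else groups ++ [current]).map pvReduce

-- ===== PRECONDITION & SPEC =====
-- token i's tag, and the prev_ne_tag value A holds when reaching token i
def pvTagAt (l : List ((Int × Int) × String × String)) (i : Nat) : String :=
  (l.getD i ((0, 0), "", "")).2.2
def pvPrevT (l : List ((Int × Int) × String × String)) (i : Nat) : String :=
  if i = 0 then "" else PySem.Str.slice (pvTagAt l (i - 1)) (some 2) none
def pvOpens (l : List ((Int × Int) × String × String)) (i : Nat) : Bool :=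
  PySem.Str.startswith (pvTagAt l i) "B" ||
    (PySem.Str.startswith (pvTagAt l i) "I" &&
      (PySem.Str.slice (pvTagAt l i) (some 2) none != pvPrevT l i))
def pvConts (l : List ((Int × Int) × String × String)) (i : Nat) : Bool :=
  PySem.Str.startswith (pvTagAt l i) "I" &&
    (PySem.Str.slice (pvTagAt l i) (some 2) none == pvPrevT l i)

-- Pre_ excludes exactly the inputs on which A raises NameError: a continuation I-token
-- (tag starting with 'I' whose type tag[2:] equals the previous token's type) occurring
-- before any token has ever opened a chunk, so A reads actor_lexical_head unassigned.
def Pre_chunknize_actors (annotations : List ((Int × Int) × String × String)) : Prop :=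
  ∀ i < annotations.length, pvConts annotations i = true → ∃ j < i, pvOpens annotations j = true
instance (annotations : List ((Int × Int) × String × String)) : Decidable (Pre_chunknize_actors annotations) := by unfold Pre_chunknize_actors; infer_instance

def pvWitness_chunknize_actors : (List ((Int × Int) × String × String)) :=
  [((0, 3), "Noun", "B-PER"), ((4, 7), "Verb", "I-PER"), ((8, 9), "Noun", "O")]

def Spec_chunknize_actors (annotations : List ((Int × Int) × String × String)) (out : List ((Int × Int) × String × String)) : Prop := out = chunknize_actors_alt annotations
instance (annotations : List ((Int × Int) × String × String)) (out : List ((Int × Int) × String × String)) : Decidable (Spec_chunknize_actors annotations out) := by unfold Spec_chunknize_actors; infer_instance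

-- ===== CLAIM (what is proved, stated in full; the proofs are below) =====
def Claim_equal_chunknize_actors : Prop := ∀ (annotations : List ((Int × Int) × String × String)), Dom_chunknize_actors annotations → Pre_chunknize_actors annotations → Spec_chunknize_actors annotations (chunknize_actors annotations)

-- ===== LEMMAS AND PROOFS =====
-- the actor_* quadruple A holds while the tokens `g` form the open chunk
def pvVarsOf (g : List ((Int × Int) × String × String)) : Int × Int × String × String :=
  match g with
  | [] => (0, 0, "", "")
  | a :: r => (a.1.1, ((a :: r).getLastD a).1.2, pvHeadOf (a :: r),
      PySem.Str.slice a.2.2 (some 2) none)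

def pvFinA
    (st : List ((Int × Int) × String × String) × Bool × String × Option (Int × Int × String × String)) :
    List ((Int × Int) × String × String) :=
  match st with
  | (actors, ready, _, vars) => if ready then pvFlushA actors vars else actors

def pvFinB
    (st : List (List ((Int × Int) × String × String)) × List ((Int × Int) × String × String) × String) :
    List ((Int × Int) × String × String) :=
  match st with
  | (groups, current, _) => (if current.isEmpty then groups else groups ++ [current]).map pvReduce

lemma pv_getLastD_concat {α : Type} (g : List α) (x d : α) : (g ++ [x]).getLastD d = x := by
  simp [List.getLastD_eq_getLast?]

lemma pv_headOf_concat (g : List ((Int × Int) × String × String))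
    (x : (Int × Int) × String × String) :
    pvHeadOf (g ++ [x]) = if pvHeadOf g != "UNDEF" then pvHeadOf g else pvHeadOf [x] := by
  induction g with
  | nil => simp [pvHeadOf]
  | cons a r ih =>
    by_cases h : (a.2.1 == "Noun" || a.2.1 == "Pronoun") = true
    · have hne : (a.2.1 != "UNDEF") = true := by
        rcases Bool.or_eq_true_iff.mp h with h' | h' <;>
          simp_all [beq_iff_eq, bne_iff_ne]
      simp [pvHeadOf, h, hne]
    · simp only [Bool.not_eq_true] at h
      simp [pvHeadOf, h, ih]

lemma pv_main (l : List ((Int × Int) × String × String)) :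
    ∀ (groups : List (List ((Int × Int) × String × String)))
      (current : List ((Int × Int) × String × String)) (prev : String)
      (vars : Option (Int × Int × String × String)),
      (current ≠ [] → vars = some (pvVarsOf current)) →
      pvFinA (List.foldl pvStepA (groups.map pvReduce, !current.isEmpty, prev, vars) l)
        = pvFinB (List.foldl pvStepB (groups, current, prev) l) := by
  induction l with
  | nil =>
    intro groups current prev vars hv
    cases current with
    | nil => simp [pvFinA, pvFinB]
    | cons a r =>
      rw [hv (by simp)]
      simp [pvFinA, pvFinB, pvFlushA, pvVarsOf, pvReduce]
  | cons ann t ih =>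
    intro groups current prev vars hv
    simp only [List.foldl_cons, pvStepA, pvStepB]
    set tg := PySem.Str.slice ann.2.2 (some 2) none with htg
    by_cases hc1 : (PySem.Str.startswith ann.2.2 "B" || (PySem.Str.startswith ann.2.2 "I" && (tg != prev))) = true
    · -- opener: a new chunk starts
      simp only [hc1, if_true]
      cases current with
      | nil =>
        simpa using ih groups [ann] tg _ (by intro _; simp [pvVarsOf, pvHeadOf, htg])
      | cons a r =>
        rw [hv (by simp)]
        have h2 := ih (groups ++ [(a :: r)]) [ann] tg
          (some (ann.1.1, ann.1.2,
            (if ann.2.1 == "Noun" || ann.2.1 == "Pronoun" then ann.2.1 else "UNDEF"), tg))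
          (by intro _; simp [pvVarsOf, pvHeadOf, htg])
        simpa [pvFlushA, pvVarsOf, pvReduce, List.map_append] using h2
    · simp only [Bool.not_eq_true] at hc1
      simp only [hc1, Bool.false_eq_true, if_false]
      by_cases hc2 : PySem.Str.startswith ann.2.2 "I" = true
      · -- continuation I-token
        simp only [hc2, if_true]
        cases current with
        | nil =>
          simpa using ih groups [] tg (vars.map _) (by intro h; exact absurd rfl h)
        | cons a r =>
          rw [hv (by simp)]
          have h2 := ih groups ((a :: r) ++ [ann]) tg (some (pvVarsOf ((a :: r) ++ [ann])))
            (by intro _; rfl)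
          have hvars : pvVarsOf ((a :: r) ++ [ann])
              = (a.1.1, ann.1.2,
                 (if pvHeadOf (a :: r) != "UNDEF" then pvHeadOf (a :: r)
                  else if ann.2.1 == "Noun" || ann.2.1 == "Pronoun" then ann.2.1 else "UNDEF"),
                 PySem.Str.slice a.2.2 (some 2) none) := by
            have hcons : (a :: r) ++ [ann] = a :: (r ++ [ann]) := by simp
            rw [hcons]
            simp only [pvVarsOf]
            refine Prod.ext rfl (Prod.ext ?_ (Prod.ext ?_ rfl))
            · show ((a :: (r ++ [ann])).getLastD a).1.2 = ann.1.2
              have : (a :: (r ++ [ann])) = (a :: r) ++ [ann] := by simp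
              rw [this, pv_getLastD_concat]
            · show pvHeadOf (a :: (r ++ [ann])) = _
              have : (a :: (r ++ [ann])) = (a :: r) ++ [ann] := by simp
              rw [this, pv_headOf_concat]
              by_cases hh : (pvHeadOf (a :: r) != "UNDEF") = true
              · simp [hh]
              · simp only [Bool.not_eq_true] at hh
                simp [pvHeadOf]
          rw [hvars] at h2
          simpa [pvVarsOf] using h2
      · simp only [Bool.not_eq_true] at hc2
        simp only [hc2, Bool.false_eq_true, if_false]
        by_cases hc3 : PySem.Str.startswith ann.2.2 "O" = true
        · -- O-token: closes an open chunk
          simp only [hc3, if_true, Bool.true_and]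
          cases current with
          | nil =>
            simpa using ih groups [] tg vars (by intro h; exact absurd rfl h)
          | cons a r =>
            rw [hv (by simp)]
            have h2 := ih (groups ++ [(a :: r)]) [] tg
              (some (pvVarsOf (a :: r))) (by intro h; exact absurd rfl h)
            simpa [pvFlushA, pvVarsOf, pvReduce, List.map_append] using h2
        · simp only [Bool.not_eq_true] at hc3
          simp only [hc3, Bool.false_eq_true, if_false]
          exact ih groups current tg vars hv

-- ===== VERDICT (by name: the statement is the Claim_ definition above) =====
theorem chunknize_actors_spec : Claim_equal_chunknize_actors := by
  intro annotations _ _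
  unfold Spec_chunknize_actors
  have h := pv_main annotations [] [] "" none (by intro h; exact absurd rfl h)
  simpa [pvFinA, pvFinB, chunknize_actors, chunknize_actors_alt] using h
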